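-- pv_equiv track=rewrite | github.com/yuhangear/change | wenet/bin/word_alignment.py | get_frames_timestamp_word
-- ===== SOURCE A (Python) =====
-- def get_frames_timestamp_word(alignment,mid_token):
--     # convert alignment to a praat format, which is a doing phonetics
--     # by computer and helps analyzing alignment
--     timestamp = []
--     # get frames level duration for each token
--     start = 0
--     end = 0
--     while end < len(alignment):
--         while end < len(alignment) and alignment[end] == 0:
--             end += 1
--         if end == len(alignment):
--             timestamp[-1] += alignment[start:]
--             break
--         end += 1
--         while end < len(alignment) and alignment[end - 1] == alignment[end]:
--             end += 1
--         timestamp.append(alignment[start:end])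
--         start = end
--     timestamp_new=[]
--     for i in timestamp:
--         i=i.copy()
--         if i[-1] not in mid_token :
--             timestamp_new.append(i)
--         else:
--             timestamp_new[-1].extend(i)
--     # timestamp
--     return timestamp_new
-- ===== SOURCE B (Python) =====
-- def get_frames_timestamp_word(alignment, mid_token):
--     # Decomposition: (1) compress alignment into runs (value, count);
--     # (2) attach each zero-run to the following nonzero-run to form a segment,
--     # appending a trailing zero-run onto the last segment;
--     # (3) merge any segment whose last element is in mid_token into the previous one.
--     runs = []
--     for x in alignment:
--         if runs and runs[-1][0] == x:
--             runs[-1][1] += 1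
--         else:
--             runs.append([x, 1])
--     segments = []
--     pending = []
--     for v, n in runs:
--         if v == 0:
--             pending = pending + [0] * n
--         else:
--             segments.append(pending + [v] * n)
--             pending = []
--     if pending:
--         segments[-1] = segments[-1] + pending
--     merged = []
--     for seg in segments:
--         if seg[-1] in mid_token:
--             merged[-1] = merged[-1] + seg
--         else:
--             merged.append(seg)
--     return merged
-- ===== Notes on version B (the rewrite author's own statement) =====
-- stated objective: alternative
-- what changed: Replaces A's nested-while index-cursor scan by a three-stage pipeline: run-length-encode the alignment, attach each zero-run to the following nonzero run (trailing zeros onto the last segment), then merge mid_token segments; same O(n) cost.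
import Mathlib
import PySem

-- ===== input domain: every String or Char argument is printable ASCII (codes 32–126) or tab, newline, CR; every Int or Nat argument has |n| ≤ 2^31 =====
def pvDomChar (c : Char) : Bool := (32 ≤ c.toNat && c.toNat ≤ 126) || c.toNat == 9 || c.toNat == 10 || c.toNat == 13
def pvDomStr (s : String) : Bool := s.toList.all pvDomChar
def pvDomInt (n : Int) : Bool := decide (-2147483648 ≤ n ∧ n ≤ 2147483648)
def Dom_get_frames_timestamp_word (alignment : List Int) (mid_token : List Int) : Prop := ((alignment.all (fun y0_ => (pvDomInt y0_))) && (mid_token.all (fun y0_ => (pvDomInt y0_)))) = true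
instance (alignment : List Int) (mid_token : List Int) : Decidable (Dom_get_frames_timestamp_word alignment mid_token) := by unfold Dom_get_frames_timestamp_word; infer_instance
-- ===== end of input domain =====

-- B re-decomposes A's cursor scan as runs → attach-zero-runs → merge; same return value on Pre_ (alternative decomposition, same cost).

-- shared tiny helper: mutate the last element of a list of lists ('xs[-1] = f xs[-1]'; on [] Python raises, excluded by Pre_)
def pvModLast (f : List Int → List Int) : List (List Int) → List (List Int)
  | [] => []
  | [x] => [f x]
  | x :: xs => x :: pvModLast f xs

-- ===== PORT A =====
-- inner 'while end < len and alignment[end] == 0: end += 1'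
def pvSkip0 (al : List Int) (e : Nat) : Nat :=
  if h : e < al.length then
    if al.getD e 0 = 0 then pvSkip0 al (e + 1) else e
  else e
termination_by al.length - e

-- inner 'while end < len and alignment[end-1] == alignment[end]: end += 1'
def pvSkipEq (al : List Int) (e : Nat) : Nat :=
  if h : e < al.length then
    if al.getD (e - 1) 0 = al.getD e 0 then pvSkipEq al (e + 1) else e
  else e
termination_by al.length - e

theorem pvSkip0_le (al : List Int) (e : Nat) : e ≤ pvSkip0 al e := by
  unfold pvSkip0
  split
  · split
    · exact Nat.le_trans (Nat.le_succ e) (pvSkip0_le al (e + 1))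
    · exact Nat.le_refl e
  · exact Nat.le_refl e
termination_by al.length - e

theorem pvSkipEq_le (al : List Int) (e : Nat) : e ≤ pvSkipEq al e := by
  unfold pvSkipEq
  split
  · split
    · exact Nat.le_trans (Nat.le_succ e) (pvSkipEq_le al (e + 1))
    · exact Nat.le_refl e
  · exact Nat.le_refl e
termination_by al.length - e

-- outer while loop of A: state (start, end, timestamp); start = end at every loop head
def pvOuter (al : List Int) (e : Nat) (ts : List (List Int)) : List (List Int) :=
  if _h : e < al.length then
    if pvSkip0 al e = al.length then
      pvModLast (· ++ al.drop e) ts          -- 'timestamp[-1] += alignment[start:]; break'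
    else
      pvOuter al (pvSkipEq al (pvSkip0 al e + 1))
        (ts ++ [(al.drop e).take (pvSkipEq al (pvSkip0 al e + 1) - e)])   -- 'timestamp.append(alignment[start:end]); start = end'
  else ts
termination_by al.length - e
decreasing_by
  have h1 := pvSkip0_le al e
  have h2 := pvSkipEq_le al (pvSkip0 al e + 1)
  omega

-- second loop of A: 'for i in timestamp: if i[-1] not in mid_token: append else extend last'
def pvMergeA (mid : List Int) (acc : List (List Int)) : List (List Int) → List (List Int)
  | [] => acc
  | i :: rest =>
    if ¬ (mid.contains (i.getLastD 0)) then pvMergeA mid (acc ++ [i]) rest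
    else pvMergeA mid (pvModLast (· ++ i) acc) rest

def get_frames_timestamp_word (alignment : List Int) (mid_token : List Int) : List (List Int) :=
  pvMergeA mid_token [] (pvOuter alignment 0 [])

-- ===== PORT B =====
-- run-length compression loop of Source B
def pvStepRun (runs : List (Int × Nat)) (x : Int) : List (Int × Nat) :=
  match runs.getLast? with
  | some (v, c) => if v = x then runs.dropLast ++ [(v, c + 1)] else runs ++ [(x, 1)]
  | none => [(x, 1)]

def pvRuns (al : List Int) : List (Int × Nat) := al.foldl pvStepRun []

-- attach loop: zero-runs join 'pending', each nonzero run closes a segment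
def pvAttach (st : List (List Int) × List Int) (r : Int × Nat) : List (List Int) × List Int :=
  if r.1 = 0 then (st.1, st.2 ++ List.replicate r.2 0)
  else (st.1 ++ [st.2 ++ List.replicate r.2 r.1], [])

def pvSegs (al : List Int) : List (List Int) :=
  let st := (pvRuns al).foldl pvAttach ([], [])
  if st.2 = [] then st.1 else pvModLast (· ++ st.2) st.1

-- merge loop of Source B
def pvMergeB (mid : List Int) (acc : List (List Int)) : List (List Int) → List (List Int)
  | [] => acc
  | seg :: rest =>
    if mid.contains (seg.getLastD 0) then pvMergeB mid (pvModLast (· ++ seg) acc) rest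
    else pvMergeB mid (acc ++ [seg]) rest

def get_frames_timestamp_word_alt (alignment : List Int) (mid_token : List Int) : List (List Int) :=
  pvMergeB mid_token [] (pvSegs alignment)

-- ===== PRECONDITION & SPEC =====
-- Pre_ excludes exactly the inputs where A raises IndexError: a nonempty all-zeros alignment,
-- and an alignment whose first token segment ends in a mid_token value (B raises there too).
def Pre_get_frames_timestamp_word (alignment : List Int) (mid_token : List Int) : Prop :=
  alignment = [] ∨
    (let r := alignment.dropWhile (fun y => y == 0)
     r ≠ [] ∧
       (let v := r.headD 0
        let rest := r.dropWhile (fun y => y == v)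
        ¬ mid_token.contains (if rest ≠ [] ∧ rest.all (fun y => y == 0) then (0 : Int) else v)))
instance (alignment : List Int) (mid_token : List Int) : Decidable (Pre_get_frames_timestamp_word alignment mid_token) := by unfold Pre_get_frames_timestamp_word; infer_instance

def pvWitness_get_frames_timestamp_word : List Int × List Int := ([0, 1, 1, 0, 2, 2, 0], [2])

def Spec_get_frames_timestamp_word (alignment : List Int) (mid_token : List Int) (out : List (List Int)) : Prop := out = get_frames_timestamp_word_alt alignment mid_token
instance (alignment : List Int) (mid_token : List Int) (out : List (List Int)) : Decidable (Spec_get_frames_timestamp_word alignment mid_token out) := by unfold Spec_get_frames_timestamp_word; infer_instance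

-- ===== CLAIM (what is proved, stated in full; the proofs are below) =====
def Claim_equal_get_frames_timestamp_word : Prop := ∀ (alignment : List Int) (mid_token : List Int), Dom_get_frames_timestamp_word alignment mid_token → Pre_get_frames_timestamp_word alignment mid_token → Spec_get_frames_timestamp_word alignment mid_token (get_frames_timestamp_word alignment mid_token)

-- ===== LEMMAS AND PROOFS =====

-- general list facts assembled from named Mathlib lemmas
theorem pvLenTW_le (l : List Int) (p : Int → Bool) : (l.takeWhile p).length ≤ l.length :=
  (List.takeWhile_prefix p).length_le

theorem pvDrop_lenTW (l : List Int) (p : Int → Bool) : l.drop (l.takeWhile p).length = l.dropWhile p := by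
  nth_rewrite 2 [← List.takeWhile_append_dropWhile (p := p) (l := l)]
  exact List.drop_left

theorem pvTake_lenTW (l : List Int) (p : Int → Bool) : l.take (l.takeWhile p).length = l.takeWhile p := by
  nth_rewrite 2 [← List.takeWhile_append_dropWhile (p := p) (l := l)]
  exact List.take_left

theorem pvTW_replicate (l : List Int) (a : Int) :
    l.takeWhile (fun y => y == a) = List.replicate (l.takeWhile (fun y => y == a)).length a := by
  rw [List.eq_replicate_iff]
  refine ⟨rfl, fun b hb => ?_⟩
  simpa using List.mem_takeWhile_imp hb

theorem pvDropWhile_head_false (l : List Int) (p : Int → Bool) (v : Int) (w : List Int)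
    (h : l.dropWhile p = v :: w) : p v = false := by
  have := List.head?_dropWhile_not p l
  rw [h] at this
  simpa using this

-- reference structural recursion shared by both proofs: pending zeros p, remaining suffix s
def pvPhase (ts : List (List Int)) (p : List Int) (s : List Int) : List (List Int) :=
  if hs : s.dropWhile (fun y => y == 0) = [] then
    (if p ++ s = [] then ts else pvModLast (· ++ (p ++ s)) ts)
  else
    pvPhase
      (ts ++ [p ++ s.takeWhile (fun y => y == 0) ++
        (s.dropWhile (fun y => y == 0)).takeWhile
          (fun y => y == (s.dropWhile (fun y => y == 0)).headD 0)])
      []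
      ((s.dropWhile (fun y => y == 0)).dropWhile
        (fun y => y == (s.dropWhile (fun y => y == 0)).headD 0))
termination_by s.length
decreasing_by
  rcases hr : s.dropWhile (fun y => y == 0) with _ | ⟨v', w⟩
  · exact absurd hr hs
  · have h1 : (s.dropWhile (fun y => y == 0)).length ≤ s.length := s.length_dropWhile_le _
    rw [hr] at h1
    simp only [List.headD_cons, List.dropWhile_cons, beq_self_eq_true, if_true]
    have h2 := w.length_dropWhile_le (fun y => y == v')
    simp only [List.length_cons] at h1
    omega

theorem pvPhase_stop (ts : List (List Int)) (p s : List Int)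
    (hs : s.dropWhile (fun y => y == 0) = []) :
    pvPhase ts p s = if p ++ s = [] then ts else pvModLast (· ++ (p ++ s)) ts := by
  rw [pvPhase, dif_pos hs]

theorem pvPhase_go (ts : List (List Int)) (p s : List Int)
    (hs : s.dropWhile (fun y => y == 0) ≠ []) :
    pvPhase ts p s =
      pvPhase
        (ts ++ [p ++ s.takeWhile (fun y => y == 0) ++
          (s.dropWhile (fun y => y == 0)).takeWhile
            (fun y => y == (s.dropWhile (fun y => y == 0)).headD 0)])
        []
        ((s.dropWhile (fun y => y == 0)).dropWhile
          (fun y => y == (s.dropWhile (fun y => y == 0)).headD 0)) := by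
  rw [pvPhase, dif_neg hs]

-- ----- A-side: the cursor loop computes pvPhase -----

theorem pvGetD_drop (al : List Int) (e : Nat) (h : e < al.length) : al.getD e 0 = al[e] := by
  rw [List.getD_eq_getElem?_getD, List.getElem?_eq_getElem h]
  rfl

theorem pvSkip0_eq (al : List Int) (e : Nat) :
    pvSkip0 al e = e + ((al.drop e).takeWhile (fun y => y == 0)).length := by
  unfold pvSkip0
  split
  case isTrue h =>
    rw [List.drop_eq_getElem_cons h]
    by_cases hz : al[e] = (0 : Int)
    · rw [if_pos (by rw [pvGetD_drop al e h, hz])]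
      rw [pvSkip0_eq al (e + 1)]
      simp only [List.takeWhile_cons, hz, beq_self_eq_true, if_true, List.length_cons]
      omega
    · rw [if_neg (by rw [pvGetD_drop al e h]; exact hz)]
      simp [hz]
  case isFalse h =>
    rw [List.drop_eq_nil_of_le (by omega)]
    simp
termination_by al.length - e

theorem pvSkipEq_eq (al : List Int) (v : Int) (e : Nat) (he : 1 ≤ e)
    (hv : al.getD (e - 1) 0 = v) :
    pvSkipEq al e = e + ((al.drop e).takeWhile (fun y => y == v)).length := by
  unfold pvSkipEq
  split
  case isTrue h =>
    rw [List.drop_eq_getElem_cons h]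
    by_cases hx : al[e] = v
    · rw [if_pos (by rw [hv, pvGetD_drop al e h, hx])]
      rw [pvSkipEq_eq al v (e + 1) (by omega)
        (by simp only [Nat.add_sub_cancel]; rw [pvGetD_drop al e h]; exact hx)]
      simp only [List.takeWhile_cons, hx, beq_self_eq_true, if_true, List.length_cons]
      omega
    · rw [if_neg (by rw [hv, pvGetD_drop al e h]; exact fun hh => hx hh.symm)]
      simp [hx]
  case isFalse h =>
    rw [List.drop_eq_nil_of_le (by omega)]
    simp
termination_by al.length - e

theorem pvOuter_phase (al : List Int) (e : Nat) (ts : List (List Int)) :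
    pvOuter al e ts = pvPhase ts [] (al.drop e) := by
  unfold pvOuter
  split
  case isFalse h =>
    rw [List.drop_eq_nil_of_le (by omega)]
    rw [pvPhase_stop ts [] [] (by simp)]
    simp
  case isTrue h =>
    have hchar := pvSkip0_eq al e
    have hk1le := pvLenTW_le (al.drop e) (fun y => y == 0)
    have hlen : (al.drop e).length = al.length - e := List.length_drop
    have hdrop1 : al.drop (pvSkip0 al e) = (al.drop e).dropWhile (fun y => y == 0) := by
      rw [hchar, ← List.drop_drop]
      exact pvDrop_lenTW (al.drop e) _
    split
    case isTrue h1 =>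
      -- trailing zeros: skip ran to the end
      have hdw : (al.drop e).dropWhile (fun y => y == 0) = [] := by
        rw [← hdrop1, h1]
        exact List.drop_length
      rw [pvPhase_stop ts [] (al.drop e) hdw]
      have hne : ¬([] ++ al.drop e = ([] : List Int)) := by
        simp only [List.nil_append]
        intro hh
        rw [List.drop_eq_nil_iff] at hh
        omega
      rw [if_neg hne]
      simp
    case isFalse h1 =>
      have hdwne : (al.drop e).dropWhile (fun y => y == 0) ≠ [] := by
        intro hh
        apply h1
        rw [hchar]
        have : al.drop (pvSkip0 al e) = [] := by rw [hdrop1, hh]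
        rw [List.drop_eq_nil_iff] at this
        rw [hchar] at this
        omega
      rcases hr : (al.drop e).dropWhile (fun y => y == 0) with _ | ⟨v, w⟩
      · exact absurd hr hdwne
      have he1lt : pvSkip0 al e < al.length := by
        have : al.drop (pvSkip0 al e) ≠ [] := by rw [hdrop1, hr]; simp
        rw [ne_eq, List.drop_eq_nil_iff] at this
        omega
      have hgd : al.getD (pvSkip0 al e) 0 = v := by
        have h0 : (al.drop (pvSkip0 al e))[0]? = some v := by rw [hdrop1, hr]; rfl
        simp only [List.getElem?_drop, Nat.add_zero] at h0
        rw [List.getD_eq_getElem?_getD, h0]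
        rfl
      have hdrop2 : al.drop (pvSkip0 al e + 1) = w := by
        rw [← List.drop_drop, hdrop1, hr]
        rfl
      have he2 : pvSkipEq al (pvSkip0 al e + 1) =
          pvSkip0 al e + 1 + (w.takeWhile (fun y => y == v)).length := by
        rw [pvSkipEq_eq al v (pvSkip0 al e + 1) (by omega) (by simpa using hgd)]
        rw [hdrop2]
      -- the slice alignment[start:end]
      have hslice : (al.drop e).take (pvSkipEq al (pvSkip0 al e + 1) - e) =
          (al.drop e).takeWhile (fun y => y == 0) ++ (v :: w.takeWhile (fun y => y == v)) := by
        have hsub : pvSkipEq al (pvSkip0 al e + 1) - e =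
            ((al.drop e).takeWhile (fun y => y == 0)).length +
              (1 + (w.takeWhile (fun y => y == v)).length) := by
          rw [he2, hchar]
          omega
        rw [hsub]
        nth_rewrite 2 [← List.takeWhile_append_dropWhile
          (p := fun y => (y : Int) == 0) (l := al.drop e)]
        rw [List.take_length_add_append, hr]
        have : 1 + (w.takeWhile (fun y => y == v)).length =
            (w.takeWhile (fun y => y == v)).length + 1 := by omega
        rw [this, List.take_succ_cons, pvTake_lenTW]
      have hdrop3 : al.drop (pvSkipEq al (pvSkip0 al e + 1)) = w.dropWhile (fun y => y == v) := by
        rw [he2, ← List.drop_drop, hdrop2]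
        exact pvDrop_lenTW w _
      rw [pvOuter_phase al (pvSkipEq al (pvSkip0 al e + 1)) (ts ++ [(al.drop e).take (pvSkipEq al (pvSkip0 al e + 1) - e)])]
      rw [hslice, hdrop3]
      conv_rhs => rw [pvPhase_go ts [] (al.drop e) (by rw [hr]; simp)]
      rw [hr]
      simp only [List.headD_cons, List.takeWhile_cons, List.dropWhile_cons,
        beq_self_eq_true, if_true, List.nil_append]
  termination_by al.length - e
  decreasing_by
    have hle1 := pvSkipEq_le al (pvSkip0 al e + 1)
    have hle2 := pvSkip0_le al e
    omega

-- ----- B-side: runs + attach compute pvPhase -----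

def runsOf : List Int → List (Int × Nat)
  | [] => []
  | x :: t => (x, 1 + (t.takeWhile (fun y => y == x)).length) :: runsOf (t.dropWhile (fun y => y == x))
termination_by l => l.length
decreasing_by
  have := t.length_dropWhile_le (fun y => y == x)
  simp only [List.length_cons]
  omega

theorem pvFoldRuns (s : List Int) : ∀ (rs : List (Int × Nat)) (v : Int) (c : Nat),
    s.foldl pvStepRun (rs ++ [(v, c)]) =
      (rs ++ [(v, c + (s.takeWhile (fun y => y == v)).length)]) ++
        runsOf (s.dropWhile (fun y => y == v)) := by
  induction s with
  | nil => intro rs v c; simp [runsOf]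
  | cons x t ih =>
    intro rs v c
    rw [List.foldl_cons]
    have hstep : pvStepRun (rs ++ [(v, c)]) x =
        if v = x then rs ++ [(v, c + 1)] else (rs ++ [(v, c)]) ++ [(x, 1)] := by
      unfold pvStepRun
      rw [List.getLast?_concat]
      simp
    by_cases hx : v = x
    · subst hx
      rw [hstep, if_pos rfl, ih rs v (c + 1)]
      simp only [List.takeWhile_cons, List.dropWhile_cons, beq_self_eq_true, if_true,
        List.length_cons]
      have : c + 1 + (t.takeWhile (fun y => y == v)).length =
          c + ((t.takeWhile (fun y => y == v)).length + 1) := by omega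
      rw [this]
    · rw [hstep, if_neg hx, ih (rs ++ [(v, c)]) x 1]
      have hpx : ((x : Int) == v) = false := by
        simp only [beq_eq_false_iff_ne, ne_eq]
        exact fun hh => hx hh.symm
      simp only [List.takeWhile_cons, List.dropWhile_cons, hpx]
      simp [runsOf, List.append_assoc]

theorem pvRuns_eq (al : List Int) : pvRuns al = runsOf al := by
  cases al with
  | nil => simp [pvRuns, runsOf]
  | cons x t =>
    unfold pvRuns
    rw [List.foldl_cons]
    have h0 : pvStepRun [] x = [] ++ [(x, 1)] := rfl
    rw [h0, pvFoldRuns t [] x 1]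
    simp [runsOf]

def pvFinish (st : List (List Int) × List Int) : List (List Int) :=
  if st.2 = [] then st.1 else pvModLast (· ++ st.2) st.1

theorem pvAttach_phase (s : List Int) : ∀ (ts : List (List Int)) (p : List Int),
    pvFinish ((runsOf s).foldl pvAttach (ts, p)) = pvPhase ts p s := by
  cases s with
  | nil =>
    intro ts p
    rw [pvPhase_stop ts p [] (by simp)]
    simp only [runsOf, List.foldl_nil, pvFinish, List.append_nil]
    by_cases hp : p = [] <;> simp [hp]
  | cons x t =>
    intro ts p
    rw [show runsOf (x :: t) =
        (x, 1 + (t.takeWhile (fun y => y == x)).length) ::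
          runsOf (t.dropWhile (fun y => y == x)) from by simp [runsOf]]
    rw [List.foldl_cons]
    by_cases hx0 : x = 0
    · subst hx0
      have hstep : pvAttach (ts, p) ((0 : Int), 1 + (t.takeWhile (fun y => y == (0 : Int))).length) =
          (ts, p ++ List.replicate (1 + (t.takeWhile (fun y => y == (0 : Int))).length) 0) := by
        unfold pvAttach
        simp
      rw [hstep]
      rw [pvAttach_phase (t.dropWhile (fun y => y == (0 : Int))) ts
        (p ++ List.replicate (1 + (t.takeWhile (fun y => y == (0 : Int))).length) 0)]
      have hrep : List.replicate (1 + (t.takeWhile (fun y => y == (0 : Int))).length) (0 : Int) =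
          (0 : Int) :: t.takeWhile (fun y => y == (0 : Int)) := by
        rw [Nat.add_comm, List.replicate_succ, ← pvTW_replicate t 0]
      have hdw : ((0 : Int) :: t).dropWhile (fun y => y == (0 : Int)) =
          t.dropWhile (fun y => y == (0 : Int)) := by
        simp [List.dropWhile_cons]
      rcases ht' : t.dropWhile (fun y => y == (0 : Int)) with _ | ⟨v, w⟩
      · -- all zeros from here on
        have ht : t = t.takeWhile (fun y => y == (0 : Int)) := by
          nth_rewrite 1 [← List.takeWhile_append_dropWhile
            (p := fun y => (y : Int) == 0) (l := t)]
          rw [ht', List.append_nil]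
        have hall : (0 : Int) :: t =
            List.replicate (1 + (t.takeWhile (fun y => y == (0 : Int))).length) 0 := by
          rw [hrep, ← ht]
        rw [pvPhase_stop _ _ [] (by simp)]
        rw [pvPhase_stop ts p ((0 : Int) :: t) (by rw [hdw, ht'])]
        rw [List.append_nil, ← hall]
      · -- a nonzero token follows the zeros
        have hv0 : ((v : Int) == 0) = false :=
          pvDropWhile_head_false t _ v w ht'
        rw [pvPhase_go _ _ (v :: w) (by simp [List.dropWhile_cons, hv0])]
        rw [pvPhase_go ts p ((0 : Int) :: t) (by rw [hdw, ht']; simp)]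
        rw [hdw, ht']
        simp only [List.dropWhile_cons, List.takeWhile_cons, hv0, Bool.false_eq_true,
          if_false, List.headD_cons, beq_self_eq_true, if_true, List.append_nil,
          hrep, List.append_assoc]
    · have hpx : ((x : Int) == 0) = false := by simp [hx0]
      have hstep : pvAttach (ts, p) (x, 1 + (t.takeWhile (fun y => y == x)).length) =
          (ts ++ [p ++ List.replicate (1 + (t.takeWhile (fun y => y == x)).length) x], []) := by
        unfold pvAttach
        simp [hx0]
      rw [hstep]
      rw [pvAttach_phase (t.dropWhile (fun y => y == x))
        (ts ++ [p ++ List.replicate (1 + (t.takeWhile (fun y => y == x)).length) x]) []]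
      have hrep : List.replicate (1 + (t.takeWhile (fun y => y == x)).length) x =
          x :: t.takeWhile (fun y => y == x) := by
        rw [Nat.add_comm, List.replicate_succ, ← pvTW_replicate t x]
      rw [pvPhase_go ts p (x :: t) (by simp [List.dropWhile_cons, hpx])]
      simp only [List.dropWhile_cons, List.takeWhile_cons, hpx, Bool.false_eq_true,
        if_false, List.headD_cons, beq_self_eq_true, if_true, List.append_nil,
        hrep]
  termination_by s.length
  decreasing_by
    all_goals
      simp only [List.length_cons]
      first
        | (have := t.length_dropWhile_le (fun y => (y : Int) == 0); omega)
        | (have := t.length_dropWhile_le (fun y => y == x); omega)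

theorem pvSegs_phase (al : List Int) : pvSegs al = pvPhase [] [] al := by
  have h : pvSegs al = pvFinish ((pvRuns al).foldl pvAttach ([], [])) := rfl
  rw [h, pvRuns_eq]
  exact pvAttach_phase al [] []

-- ----- the two merge loops are the same fold with swapped branches -----
theorem pvMerge_eq (mid : List Int) (l : List (List Int)) : ∀ acc,
    pvMergeA mid acc l = pvMergeB mid acc l := by
  induction l with
  | nil => intro acc; rfl
  | cons i rest ih =>
    intro acc
    rw [pvMergeA, pvMergeB]
    by_cases hc : mid.contains (i.getLastD 0)
    · rw [if_neg (not_not_intro hc), if_pos hc]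
      exact ih _
    · rw [if_pos hc, if_neg hc]
      exact ih _

theorem pvMain (al mid : List Int) :
    get_frames_timestamp_word al mid = get_frames_timestamp_word_alt al mid := by
  unfold get_frames_timestamp_word get_frames_timestamp_word_alt
  rw [pvMerge_eq, pvSegs_phase, pvOuter_phase al 0 []]
  rw [List.drop_zero]

-- ===== VERDICT (by name: the statement is the Claim_ definition above) =====
theorem get_frames_timestamp_word_spec : Claim_equal_get_frames_timestamp_word := by
  intro al mid _ _
  exact pvMain al mid
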